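/- GENERATED by c/gen_decode.py: decode facts of the image, one per distinct instruction byte string. -/
import UserX.DecodeImage

#decode_all Vorbis.Dec
  "09d0"  -- or eax,edx
  "0f8434fcffff"  -- je 10f2f1
  "0f84e3f8ffff"  -- je 110c44
  "0f87e3000000"  -- ja 113e09
  "0f8ec9000000"  -- jle 10d8b0
  "0fb6800000c000"  -- movzx eax,BYTE PTR [rax+0xc00000]
  "394520"  -- cmp DWORD PTR [rbp+0x20],eax
  "410fafc6"  -- imul eax,r14d
  "4139d7"  -- cmp r15d,edx
  "4183fdff"  -- cmp r13d,0xffffffff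
  "418b1e"  -- mov ebx,DWORD PTR [r14]
  "41c64500ff"  -- mov BYTE PTR [r13+0x0],0xff
  "428d5c3500"  -- lea ebx,[rbp+r14*1+0x0]
  "4439a338060000"  -- cmp DWORD PTR [rbx+0x638],r12d
  "44896c2408"  -- mov DWORD PTR [rsp+0x8],r13d
  "4489e9"  -- mov ecx,r13d
  "448b8538ffffff"  -- mov r8d,DWORD PTR [rbp-0xc8]
  "450fbfe5"  -- movsx r12d,r13w
  "4589f8"  -- mov r8d,r15d
  "4801c3"  -- add rbx,rax
  "48635520"  -- movsxd rdx,DWORD PTR [rbp+0x20]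
  "4881ecc8000000"  -- sub rsp,0xc8
  "4889042520f01f00"  -- mov QWORD PTR ds:0x1ff020,rax
  "4889ce"  -- mov rsi,rcx
  "488b6b30"  -- mov rbp,QWORD PTR [rbx+0x30]
  "488d1c02"  -- lea rbx,[rdx+rax*1]
  "488d7b0c"  -- lea rdi,[rbx+0xc]
  "488d7f18"  -- lea rdi,[rdi+0x18]
  "488dbbe0010000"  -- lea rdi,[rbx+0x1e0]
  "488dbfd8060000"  -- lea rdi,[rdi+0x6d8]
  "48c783e800c00000000000"  -- mov QWORD PTR [rbx+0xc000e8],0x0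
  "4963c7"  -- movsxd rax,r15d
  "4989ee"  -- mov r14,rbp
  "498d7c24f8"  -- lea rdi,[r12-0x8]
  "498dbef4060000"  -- lea rdi,[r14+0x6f4]
  "4a8dbc24a0000000"  -- lea rdi,[rsp+r12*1+0xa0]
  "4c39eb"  -- cmp rbx,r13
  "4c89cd"  -- mov rbp,r9
  "4c8ba5a8000000"  -- mov r12,QWORD PTR [rbp+0xa8]
  "4c8db42420010000"  -- lea r14,[rsp+0x120]
  "4d8d3407"  -- lea r14,[r15+rax*1]
  "660f28e2"  -- movapd xmm4,xmm2
  "66410f6eef"  -- movd xmm5,r15d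
  "6683fb01"  -- cmp bx,0x1
  "7424"  -- je 10f73e
  "750e"  -- jne 113b15
  "77d0"  -- ja 114846
  "7e19"  -- jle 108856
  "7feb"  -- jg 100c06
  "83bbe806000009"  -- cmp DWORD PTR [rbx+0x6e8],0x9
  "88542418"  -- mov BYTE PTR [rsp+0x18],dl
  "8975bc"  -- mov DWORD PTR [rbp-0x44],esi
  "89f3"  -- mov ebx,esi
  "8b5c2450"  -- mov ebx,DWORD PTR [rsp+0x50]
  "8b9524ffffff"  -- mov edx,DWORD PTR [rbp-0xdc]
  "b940471000"  -- mov ecx,0x104740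
  "c1f805"  -- sar eax,0x5
  "c781a400c00000000000"  -- mov DWORD PTR [rcx+0xc000a4],0x0
  "e80079feff"  -- call 101440
  "e80a10ffff"  -- call 104c60
  "e814ebfeff"  -- call 100300
  "e81d10ffff"  -- call 100800
  "e8286cffff"  -- call 100640
  "e83040ffff"  -- call 100640
  "e83abbfeff"  -- call 100640
  "e8466dffff"  -- call 10ba60
  "e8509bffff"  -- call 100640
  "e85b0e0000"  -- call 100e60
  "e869bcffff"  -- call 103f80
  "e874fdfeff"  -- call 1044a0
  "e87f71ffff"  -- call 100640
  "e88abefeff"  -- call 1008e0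
  "e8946fffff"  -- call 100640
  "e89eb5ffff"  -- call 100640
  "e8a910ffff"  -- call 100800
  "e8b2aefeff"  -- call 100560
  "e8bcd3feff"  -- call 1003c0
  "e8c80fffff"  -- call 100300
  "e8d0c1ffff"  -- call 100300
  "e8db30ffff"  -- call 100800
  "e8e4ebfeff"  -- call 103d00
  "e8ed31ffff"  -- call 100640
  "e8f7f0feff"  -- call 100640
  "e90e040000"  -- jmp 10fa53
  "e955010000"  -- jmp 11545c
  "e9a5d2ffff"  -- jmp 113b22
  "e9f6010000"  -- jmp 109d14
  "eb8b"  -- jmp 112f26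
  "ebe8"  -- jmp 103eb0
  "f20f58c1"  -- addsd xmm0,xmm1
  "f20f5e15fcdf0100"  -- divsd xmm2,QWORD PTR [rip+0x1dffc]
  "f30f10542408"  -- movss xmm2,DWORD PTR [rsp+0x8]
  "f30f1075c0"  -- movss xmm6,DWORD PTR [rbp-0x40]
  "f30f1154240c"  -- movss DWORD PTR [rsp+0xc],xmm2
  "f30f117c2408"  -- movss DWORD PTR [rsp+0x8],xmm7
  "f30f58e8"  -- addss xmm5,xmm0
  "f30f5a44240c"  -- cvtss2sd xmm0,DWORD PTR [rsp+0xc]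
  "f3410f10442418"  -- movss xmm0,DWORD PTR [r12+0x18]
  "f3410f5c742408"  -- subss xmm6,DWORD PTR [r12+0x8]
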